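-- pv_equiv track=rewrite | github.com/axelFrau/Atelier_prog_4 | ATELIER 4/Atelier4_Chaines_de_caractère.py | renverse
-- ===== SOURCE A (Python) =====
-- def ouvrante(char:str)->bool :
--     chars = ["(", "[", "{"]
--     for e in chars :
--         if e == char :
--             return True
--     return False
--
-- def fermante(char:str)->bool :
--     chars = [")", "]", "}"]
--     for e in chars :
--         if e == char :
--             return True
--     return False
--
-- def renverse(char:str)->str :
--     open_chars = ["(", "[", "{"]
--     close_chars = [")", "]", "}"]
--     if fermante(char) :
--         for i in range(len(close_chars)) :
--             if char == close_chars[i] :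
--                 return open_chars[i]
--     elif ouvrante(char) :
--         for i in range(len(open_chars)) :
--             if char == open_chars[i] :
--                 return close_chars[i]
--     else :
--         return char
-- ===== SOURCE B (Python) =====
-- def renverse(char: str) -> str:
--     pairs = "()[]{}"
--     if len(char) == 1:
--         i = pairs.find(char)
--         if i >= 0:
--             return pairs[i + 1 - 2 * (i % 2)]
--     return char
-- ===== Notes on version B (the rewrite author's own statement) =====
-- stated objective: alternative
-- what changed: Replaces the classifier helpers, parallel open/close lists and index-search loops with arithmetic pairing: one find in a six-character pairs string and flipping the low bit of the index (i+1-2*(i%2)) to reach the partner character.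
import Mathlib
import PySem

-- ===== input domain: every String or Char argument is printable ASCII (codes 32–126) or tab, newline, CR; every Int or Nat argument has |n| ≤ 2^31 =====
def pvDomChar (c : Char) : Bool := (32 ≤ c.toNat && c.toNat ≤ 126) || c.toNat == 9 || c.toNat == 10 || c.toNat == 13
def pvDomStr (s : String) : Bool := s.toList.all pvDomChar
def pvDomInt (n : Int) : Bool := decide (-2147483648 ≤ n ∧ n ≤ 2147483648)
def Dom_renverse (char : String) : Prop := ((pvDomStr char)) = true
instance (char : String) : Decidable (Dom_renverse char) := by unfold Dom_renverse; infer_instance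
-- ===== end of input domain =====

-- B replaces A's classifier helpers, parallel lists and index-search loops with arithmetic
-- pairing in a single six-character pairs string (find the index, flip its low bit); return value identical.

-- ===== PORT A =====
-- "for e in chars: if e == char: return True / return False"
def scanEq (char : String) : List String → Bool
  | [] => false
  | e :: rest => if e == char then true else scanEq char rest

def ouvrante (char : String) : Bool := scanEq char ["(", "[", "{"]

def fermante (char : String) : Bool := scanEq char [")", "]", "}"]

-- "for i in range(len(cs)): if char == cs[i]: return os[i]"; the Python falls through
-- (returning None) only when the guard fermante/ouvrante is false, which never happens
-- at the call sites, so the `.getD char` default is unreachable there.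
def scanIdx (char : String) (cs os : List String) : List Int → Option String
  | [] => none
  | i :: rest =>
    if char == (PySem.List.pyGet? cs i).getD "" then PySem.List.pyGet? os i
    else scanIdx char cs os rest

def renverse (char : String) : String :=
  let open_chars := ["(", "[", "{"]
  let close_chars := [")", "]", "}"]
  if fermante char then
    (scanIdx char close_chars open_chars (PySem.List.pyRange 0 (close_chars.length) 1)).getD char
  else if ouvrante char then
    (scanIdx char open_chars close_chars (PySem.List.pyRange 0 (open_chars.length) 1)).getD char
  else char

-- ===== PORT B =====
-- Source B: on a single char found in the pairs string at index i, return pairs[i + 1 - 2*(i % 2)].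
-- pairs[j] always succeeds there (j in range), so the `.getD char` default is unreachable.
def renverse_alt (char : String) : String :=
  let pairs : String := "()[]{}"
  if PySem.Str.len char == 1 then
    let i := PySem.Str.find pairs char
    if i ≥ 0 then
      ((PySem.Str.pyGet? pairs (i + 1 - 2 * PySem.Int.mod i 2)).map
        (fun c => String.ofList [c])).getD char
    else char
  else char

-- ===== PRECONDITION & SPEC =====
def Spec_renverse (char : String) (out : String) : Prop := out = renverse_alt char
instance (char : String) (out : String) : Decidable (Spec_renverse char out) := by unfold Spec_renverse; infer_instance

-- ===== CLAIM (what is proved, stated in full; the proofs are below) =====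
def Claim_equal_renverse : Prop := ∀ (char : String), Dom_renverse char → Spec_renverse char (renverse char)

-- ===== LEMMAS AND PROOFS =====

-- ===== VERDICT (by name: the statement is the Claim_ definition above) =====
theorem renverse_spec : Claim_equal_renverse := by
  intro char _
  unfold Spec_renverse
  by_cases h1 : char = "(" ; · subst h1; decide
  by_cases h2 : char = "[" ; · subst h2; decide
  by_cases h3 : char = "{" ; · subst h3; decide
  by_cases h4 : char = ")" ; · subst h4; decide
  by_cases h5 : char = "]" ; · subst h5; decide
  by_cases h6 : char = "}" ; · subst h6; decide
  -- char is none of the six brackets: both sides return char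
  have e1 : (("(" : String) == char) = false := by simp [Ne.symm h1]
  have e2 : (("[" : String) == char) = false := by simp [Ne.symm h2]
  have e3 : (("{" : String) == char) = false := by simp [Ne.symm h3]
  have e4 : ((")" : String) == char) = false := by simp [Ne.symm h4]
  have e5 : (("]" : String) == char) = false := by simp [Ne.symm h5]
  have e6 : (("}" : String) == char) = false := by simp [Ne.symm h6]
  have hA : renverse char = char := by
    simp [renverse, fermante, ouvrante, scanEq, e1, e2, e3, e4, e5, e6]
  rw [hA]
  by_cases hl : char.toList.length = 1
  · obtain ⟨c, hc⟩ := List.length_eq_one_iff.mp hl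
    have hchar : char = String.ofList [c] := by
      have := congrArg String.ofList hc
      simpa using this
    have hfind : PySem.Str.find "()[]{}" char = -1 := by
      rw [PySem.Str.find_eq_neg_one_iff]
      intro hinf
      have hmem : c ∈ ("()[]{}" : String).toList := hinf.subset (by simp [hc])
      have hor : c = '(' ∨ c = ')' ∨ c = '[' ∨ c = ']' ∨ c = '{' ∨ c = '}' := by
        simpa using hmem
      rcases hor with h | h | h | h | h | h <;> subst h
      · exact h1 hchar
      · exact h4 hchar
      · exact h2 hchar
      · exact h5 hchar
      · exact h3 hchar
      · exact h6 hchar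
    have hfind' : PySem.Chars.find ['(', ')', '[', ']', '{', '}'] char.toList = -1 := by
      simpa [PySem.Str.find] using hfind
    simp [renverse_alt, hfind', PySem.Str.len_eq, hl]
  · have hlen : ¬ char.length = 1 := hl
    simp [renverse_alt, hlen]
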